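-- pv_equiv track=rewrite | github.com/redthing1/gdbstub_cpp | test/gdbstub/lldb_e2e_dlang_test.py | unescape_rsp_binary
-- ===== SOURCE A (Python) =====
-- def unescape_rsp_binary(payload: str) -> str:
--     out: list[str] = []
--     i = 0
--     while i < len(payload):
--         c = payload[i]
--         if c == "}" and i + 1 < len(payload):
--             out.append(chr(ord(payload[i + 1]) ^ 0x20))
--             i += 2
--             continue
--         out.append(c)
--         i += 1
--     return "".join(out)
-- ===== SOURCE B (Python) =====
-- def unescape_rsp_binary(payload: str) -> str:
--     # Staged approach: split the payload on '}' once, then reassemble the parts.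
--     # The first part is verbatim; each later part begins right after a '}', so
--     # its first char is XORed with 0x20. An empty later part means the '}' was
--     # followed by another '}' (the next separator, decoded as ']' = chr(0x7d^0x20))
--     # or stood at the very end of the string (kept verbatim).
--     parts = payload.split("}")
--     out = [parts[0]]
--     k = 1
--     while k < len(parts):
--         p = parts[k]
--         if p:
--             out.append(chr(ord(p[0]) ^ 0x20) + p[1:])
--             k += 1
--         elif k + 1 < len(parts):
--             out.append("]" + parts[k + 1])
--             k += 2
--         else:
--             out.append("}")
--             k += 1
--     return "".join(out)
-- ===== Notes on version B (the rewrite author's own statement) =====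
-- stated objective: faster
-- what changed: Replaces A's char-by-char index loop with a staged algorithm: split the payload on '}' once with str.split, then reassemble the parts, XOR-decoding the first character of each later part (empty parts encode '}}' pairs or a trailing '}'); bulk C-level split/join and slice copies replace per-character Python bytecode.
import Mathlib
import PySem

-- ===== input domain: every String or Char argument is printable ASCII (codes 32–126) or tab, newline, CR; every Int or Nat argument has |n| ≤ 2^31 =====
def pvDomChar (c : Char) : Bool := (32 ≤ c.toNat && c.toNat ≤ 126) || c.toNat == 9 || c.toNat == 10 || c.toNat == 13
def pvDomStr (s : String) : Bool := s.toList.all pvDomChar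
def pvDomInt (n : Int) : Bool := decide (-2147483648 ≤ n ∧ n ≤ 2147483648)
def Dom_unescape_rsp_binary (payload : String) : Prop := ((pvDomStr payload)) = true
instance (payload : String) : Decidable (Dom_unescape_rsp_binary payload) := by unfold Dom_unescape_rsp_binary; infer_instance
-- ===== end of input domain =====

-- B replaces A's char-by-char index loop by a staged algorithm: split the payload
-- on '}' once, then reassemble the parts, XOR-decoding each part's first char
-- (same O(n), measured constant-factor faster in Python via bulk split/join).

-- ===== PORT A =====
-- literal port of A's while loop: index i, bounds checks, append to out
def pvAGo (payload : List Char) (i : Nat) (out : List Char) : List Char :=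
  if _h : i < payload.length then
    let c := payload[i]!
    if c = '}' ∧ i + 1 < payload.length then
      pvAGo payload (i + 2) (out ++ [Char.ofNat ((payload[i+1]!).toNat ^^^ 0x20)])
    else
      pvAGo payload (i + 1) (out ++ [c])
  else out
termination_by payload.length - i

def unescape_rsp_binary (payload : String) : String :=
  String.ofList (pvAGo payload.toList 0 [])

-- ===== PORT B =====
-- port of Source B's payload.split("}") (Python str.split with a separator: keeps empty parts)
def pvSplit : List Char → List (List Char)
  | [] => [[]]
  | c :: rest =>
    match pvSplit rest with
    | [] => [[c]]   -- unreachable: pvSplit never returns []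
    | s :: ss => if c = '}' then [] :: s :: ss else (c :: s) :: ss

-- port of Source B's while loop over parts[1:]: consumes one part (nonempty: XOR its
-- head) or, for an empty part, also the following part (prepending ']'); a final
-- empty part is a trailing '}' kept verbatim
def pvJoin : List (List Char) → List Char
  | [] => []
  | (x :: xs) :: ps => Char.ofNat (x.toNat ^^^ 0x20) :: (xs ++ pvJoin ps)
  | [] :: q :: qs => ']' :: (q ++ pvJoin qs)
  | [[]] => ['}']

def unescape_rsp_binary_alt (payload : String) : String :=
  match pvSplit payload.toList with
  | p :: ps => String.ofList (p ++ pvJoin ps)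
  | [] => ""   -- unreachable

-- ===== PRECONDITION & SPEC =====
def Spec_unescape_rsp_binary (payload : String) (out : String) : Prop := out = unescape_rsp_binary_alt payload
instance (payload : String) (out : String) : Decidable (Spec_unescape_rsp_binary payload out) := by unfold Spec_unescape_rsp_binary; infer_instance

-- ===== CLAIM (what is proved, stated in full; the proofs are below) =====
def Claim_equal_unescape_rsp_binary : Prop := ∀ (payload : String), Dom_unescape_rsp_binary payload → Spec_unescape_rsp_binary payload (unescape_rsp_binary payload)

-- ===== LEMMAS AND PROOFS =====

-- reference function: the one-pass structural recursion both ports are proved equal to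
def pvS : List Char → List Char
  | [] => []
  | c :: rest =>
    if c = '}' then
      match rest with
      | [] => [c]
      | nxt :: rest' => Char.ofNat (nxt.toNat ^^^ 0x20) :: pvS rest'
    else c :: pvS rest

theorem pvS_cons_ne (c : Char) (rest : List Char) (h : ¬ c = '}') :
    pvS (c :: rest) = c :: pvS rest := by
  rw [pvS.eq_def]; simp [h]

theorem pvSplit_ne_nil (l : List Char) : pvSplit l ≠ [] := by
  cases l with
  | nil => simp [pvSplit]
  | cons c rest =>
    cases hr : pvSplit rest with
    | nil => simp [pvSplit, hr]
    | cons s ss => by_cases h : c = '}' <;> simp [pvSplit, hr, h]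

def pvToB (l : List Char) : List Char :=
  match pvSplit l with
  | p :: ps => p ++ pvJoin ps
  | [] => []

theorem pvSplit_cons_ne (c : Char) (rest : List Char) (h : ¬ c = '}') :
    ∀ s ss, pvSplit rest = s :: ss → pvSplit (c :: rest) = (c :: s) :: ss := by
  intro s ss hr
  simp [pvSplit, hr, h]

theorem pvSplit_cons_brace (rest : List Char) :
    pvSplit ('}' :: rest) = [] :: pvSplit rest := by
  cases hr : pvSplit rest with
  | nil => exact absurd hr (pvSplit_ne_nil rest)
  | cons s ss => simp [pvSplit, hr]

theorem pvToB_cons_ne (c : Char) (rest : List Char) (h : ¬ c = '}') :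
    pvToB (c :: rest) = c :: pvToB rest := by
  unfold pvToB
  cases hr : pvSplit rest with
  | nil => exact absurd hr (pvSplit_ne_nil rest)
  | cons s ss => rw [pvSplit_cons_ne c rest h s ss hr]; simp

theorem pvToB_eq_pvS : ∀ (n : Nat) (l : List Char), l.length ≤ n → pvToB l = pvS l := by
  intro n
  induction n with
  | zero =>
    intro l hl
    have : l = [] := List.eq_nil_of_length_eq_zero (by omega)
    subst this; rfl
  | succ n ih =>
    intro l hl
    match l with
    | [] => rfl
    | c :: rest =>
      by_cases hc : c = '}'
      · subst hc
        match rest with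
        | [] =>
          unfold pvToB
          rw [pvSplit_cons_brace]
          simp [pvSplit, pvJoin, pvS]
        | d :: rest' =>
          by_cases hd : d = '}'
          · subst hd
            unfold pvToB
            rw [pvSplit_cons_brace, pvSplit_cons_brace]
            cases hr : pvSplit rest' with
            | nil => exact absurd hr (pvSplit_ne_nil rest')
            | cons s ss =>
              show pvJoin ([] :: s :: ss) = pvS ('}' :: '}' :: rest')
              rw [pvJoin]
              have hrec : pvToB rest' = pvS rest' := ih rest' (by simp at hl ⊢; omega)
              have : pvToB rest' = s ++ pvJoin ss := by unfold pvToB; rw [hr]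
              rw [← this, hrec]
              show ']' :: pvS rest' = pvS ('}' :: '}' :: rest')
              rfl
          · unfold pvToB
            rw [pvSplit_cons_brace]
            cases hr : pvSplit rest' with
            | nil => exact absurd hr (pvSplit_ne_nil rest')
            | cons s ss =>
              rw [pvSplit_cons_ne d rest' hd s ss hr]
              show pvJoin ((d :: s) :: ss) = pvS ('}' :: d :: rest')
              rw [pvJoin]
              have hrec : pvToB rest' = pvS rest' := ih rest' (by simp at hl ⊢; omega)
              have : pvToB rest' = s ++ pvJoin ss := by unfold pvToB; rw [hr]
              rw [← this, hrec]
              rfl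
      · rw [pvToB_cons_ne c rest hc, pvS_cons_ne c rest hc,
            ih rest (by simp at hl; omega)]

-- A's loop state at index i equals out ++ pvS of the remaining suffix
theorem pvAGo_eq (payload : List Char) : ∀ (n i : Nat) (out : List Char),
    payload.length - i ≤ n → pvAGo payload i out = out ++ pvS (payload.drop i) := by
  intro n
  induction n with
  | zero =>
    intro i out hn
    rw [pvAGo]
    have h : ¬ i < payload.length := by omega
    rw [dif_neg h]
    have : payload.drop i = [] := List.drop_eq_nil_of_le (by omega)
    simp [this, pvS]
  | succ n ih =>
    intro i out hn
    rw [pvAGo]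
    split
    · rename_i h
      have hdrop : payload.drop i = payload[i] :: payload.drop (i + 1) :=
        List.drop_eq_getElem_cons h
      have hget : payload[i]! = payload[i] := getElem!_pos payload i h
      by_cases hc : payload[i]! = '}' ∧ i + 1 < payload.length
      · rw [if_pos hc]
        obtain ⟨hc1, hc2⟩ := hc
        have hdrop2 : payload.drop (i + 1) = payload[i+1] :: payload.drop (i + 2) :=
          List.drop_eq_getElem_cons hc2
        have hget2 : payload[i+1]! = payload[i+1] := getElem!_pos payload (i+1) hc2
        rw [ih (i + 2) (out ++ [Char.ofNat ((payload[i+1]!).toNat ^^^ 0x20)]) (by omega)]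
        have hbrace : payload[i] = '}' := hget.symm.trans hc1
        rw [hdrop, hdrop2, hbrace]
        show out ++ [Char.ofNat ((payload[i+1]!).toNat ^^^ 0x20)] ++ pvS (payload.drop (i+2))
            = out ++ pvS ('}' :: payload[i+1] :: payload.drop (i+2))
        rw [hget2]
        simp [pvS]
      · rw [if_neg hc]
        rw [ih (i + 1) (out ++ [payload[i]!]) (by omega)]
        rw [hdrop]
        rcases Decidable.em (payload[i] = '}') with he | he
        · have hlen : ¬ i + 1 < payload.length := fun h2 => hc ⟨hget.trans he, h2⟩
          have hnil : payload.drop (i + 1) = [] := List.drop_eq_nil_of_le (by omega)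
          rw [hnil, he, hget, he]
          simp [pvS]
        · rw [pvS_cons_ne _ _ he, hget]
          simp
    · rename_i h
      have : payload.drop i = [] := List.drop_eq_nil_of_le (by omega)
      simp [this, pvS]

theorem pvAlt_eq (payload : String) :
    unescape_rsp_binary_alt payload = String.ofList (pvToB payload.toList) := by
  unfold unescape_rsp_binary_alt pvToB
  cases hr : pvSplit payload.toList with
  | nil => exact absurd hr (pvSplit_ne_nil _)
  | cons p ps => rfl

-- ===== VERDICT (by name: the statement is the Claim_ definition above) =====
theorem unescape_rsp_binary_spec : Claim_equal_unescape_rsp_binary := by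
  intro payload _
  unfold Spec_unescape_rsp_binary unescape_rsp_binary
  rw [pvAlt_eq, pvAGo_eq payload.toList payload.toList.length 0 [] (by omega),
      pvToB_eq_pvS payload.toList.length payload.toList (le_refl _)]
  simp
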